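-- pv_equiv track=rewrite | github.com/ketema/Euler_Problems | problem957/egglog_hybrid_solver.py | day_step_hybrid
-- ===== SOURCE A (Python) =====
-- from math import gcd
--
-- def igcd3(a, b, c):
--     """GCD of three integers."""
--     return gcd(gcd(abs(a), abs(b)), abs(c))
--
-- def canon_triplet(X, Y, Z):
--     """Canonical projective coordinates."""
--     if X == 0 and Y == 0 and Z == 0:
--         raise ValueError("zero vector")
--     g = igcd3(X, Y, Z)
--     X //= g
--     Y //= g
--     Z //= g
--     # Sign convention: first nonzero positive
--     if X < 0 or (X == 0 and Y < 0) or (X == 0 and Y == 0 and Z < 0):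
--         X, Y, Z = -X, -Y, -Z
--     return (X, Y, Z)
--
-- def cross(u, v):
--     """3D cross product for projective geometry."""
--     ux, uy, uz = u
--     vx, vy, vz = v
--     return (uy*vz - uz*vy, uz*vx - ux*vz, ux*vy - uy*vx)
--
-- R1 = (0, 0, 1)
--
-- R2 = (1, 0, 1)
--
-- R3 = (0, 1, 1)
--
-- REDS = {R1, R2, R3}
--
-- def day_step_hybrid(Bt):
--     """
--     Compute Bt+1 using Python geometry + EGGlog deduplication.
--
--     Strategy:
--     1. Python computes all intersections with exact arithmetic
--     2. Python canonicalizes to integer triples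
--     3. Python deduplicates (EGGlog would be overkill for this phase)
--
--     For now, we'll skip EGGlog and just use Python - Phase 1 is to verify
--     the geometry works correctly first.
--     """
--     # Lines for each pencil
--     lines_R1 = {cross(R1, b) for b in Bt}
--     lines_R2 = {cross(R2, b) for b in Bt}
--     lines_R3 = {cross(R3, b) for b in Bt}
--
--     candidates = set()
--
--     def add_intersections(LA, LB):
--         for la in LA:
--             for lb in LB:
--                 P = cross(la, lb)
--                 if P == (0, 0, 0):
--                     continue
--                 P = canon_triplet(*P)
--                 # White-only filtering
--                 if P in REDS or P in Bt:
--                     continue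
--                 candidates.add(P)
--
--     add_intersections(lines_R1, lines_R2)
--     add_intersections(lines_R1, lines_R3)
--     add_intersections(lines_R2, lines_R3)
--
--     return Bt | candidates, candidates
-- ===== SOURCE B (Python) =====
-- from math import gcd
--
-- def igcd3(a, b, c):
--     return gcd(gcd(abs(a), abs(b)), abs(c))
--
-- def canon_triplet(X, Y, Z):
--     if X == 0 and Y == 0 and Z == 0:
--         raise ValueError("zero vector")
--     g = igcd3(X, Y, Z)
--     X //= g
--     Y //= g
--     Z //= g
--     if X < 0 or (X == 0 and Y < 0) or (X == 0 and Y == 0 and Z < 0):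
--         X, Y, Z = -X, -Y, -Z
--     return (X, Y, Z)
--
-- def cross(u, v):
--     ux, uy, uz = u
--     vx, vy, vz = v
--     return (uy*vz - uz*vy, uz*vx - ux*vz, ux*vy - uy*vx)
--
-- R1 = (0, 0, 1)
-- R2 = (1, 0, 1)
-- R3 = (0, 1, 1)
-- REDS = {R1, R2, R3}
--
-- def day_step_hybrid(Bt):
--     """Direct point-pair traversal: no intermediate line tables; for each of the
--     three pencil pairs, intersect the line through Ri and a with the line
--     through Rj and b, for every ordered pair of points (a, b) in Bt."""
--     candidates = set()
--     for Ri, Rj in ((R1, R2), (R1, R3), (R2, R3)):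
--         for a in Bt:
--             la = cross(Ri, a)
--             for b in Bt:
--                 P = cross(la, cross(Rj, b))
--                 if P == (0, 0, 0):
--                     continue
--                 P = canon_triplet(*P)
--                 if P in REDS or P in Bt:
--                     continue
--                 candidates.add(P)
--     return Bt | candidates, candidates
-- ===== Notes on version B (the rewrite author's own statement) =====
-- stated objective: alternative
-- what changed: Drops the three precomputed deduplicated line tables lines_R1/R2/R3 and instead intersects lines computed on the fly while traversing ordered pairs of input points for each of the three pencil pairings.
import Mathlib
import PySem

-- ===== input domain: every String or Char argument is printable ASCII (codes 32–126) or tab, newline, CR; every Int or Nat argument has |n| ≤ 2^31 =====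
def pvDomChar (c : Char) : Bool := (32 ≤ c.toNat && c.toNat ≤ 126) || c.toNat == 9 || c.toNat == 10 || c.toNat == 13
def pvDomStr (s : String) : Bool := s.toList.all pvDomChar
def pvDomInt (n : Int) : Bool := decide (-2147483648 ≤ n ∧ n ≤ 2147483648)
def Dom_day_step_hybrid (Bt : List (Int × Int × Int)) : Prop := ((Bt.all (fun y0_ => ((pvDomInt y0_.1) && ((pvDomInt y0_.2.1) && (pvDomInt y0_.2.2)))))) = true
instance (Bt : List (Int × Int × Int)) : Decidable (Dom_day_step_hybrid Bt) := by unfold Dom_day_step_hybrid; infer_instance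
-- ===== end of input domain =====

-- B replaces A's three precomputed deduplicated line tables by a direct traversal of
-- ordered point pairs, computing both pencil lines on the fly (alternative structure, same cost).

-- shared module-level helpers of both Pythons (cross, canon_triplet, igcd3, REDS)
def pvCross (u v : Int × Int × Int) : Int × Int × Int :=
  (u.2.1 * v.2.2 - u.2.2 * v.2.1, u.2.2 * v.1 - u.1 * v.2.2, u.1 * v.2.1 - u.2.1 * v.1)

-- canon_triplet; its ValueError branch (X = Y = Z = 0) is unreachable at every call site
-- (both Pythons guard with `P == (0,0,0)` first), so the port is total.
def pvCanon (X Y Z : Int) : Int × Int × Int :=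
  let g : Int := (Nat.gcd (Nat.gcd X.natAbs Y.natAbs) Z.natAbs : Nat)
  let X := PySem.Int.floordiv X g
  let Y := PySem.Int.floordiv Y g
  let Z := PySem.Int.floordiv Z g
  if X < 0 ∨ (X = 0 ∧ Y < 0) ∨ (X = 0 ∧ Y = 0 ∧ Z < 0) then (-X, -Y, -Z) else (X, Y, Z)

def pvREDS : List (Int × Int × Int) := [(0, 0, 1), (1, 0, 1), (0, 1, 1)]

-- the shared loop body: process one intersection point P into the candidate set
def pvStep (Bt c : List (Int × Int × Int)) (P : Int × Int × Int) : List (Int × Int × Int) :=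
  if P = (0, 0, 0) then c
  else if pvCanon P.1 P.2.1 P.2.2 ∈ pvREDS ∨ pvCanon P.1 P.2.1 P.2.2 ∈ Bt then c
  else PySem.Set.add c (pvCanon P.1 P.2.1 P.2.2)

-- ===== PORT A =====
-- add_intersections(LA, LB): double loop over two line tables
def pvAddInter (Bt c LA LB : List (Int × Int × Int)) : List (Int × Int × Int) :=
  LA.foldl (fun c la => LB.foldl (fun c lb => pvStep Bt c (pvCross la lb)) c) c

def day_step_hybrid (Bt : List (Int × Int × Int)) : (List (Int × Int × Int)) × (List (Int × Int × Int)) :=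
  let lines_R1 := PySem.Set.ofList (Bt.map (fun b => pvCross (0, 0, 1) b))
  let lines_R2 := PySem.Set.ofList (Bt.map (fun b => pvCross (1, 0, 1) b))
  let lines_R3 := PySem.Set.ofList (Bt.map (fun b => pvCross (0, 1, 1) b))
  let c1 := pvAddInter Bt [] lines_R1 lines_R2
  let c2 := pvAddInter Bt c1 lines_R1 lines_R3
  let c3 := pvAddInter Bt c2 lines_R2 lines_R3
  (PySem.Set.union (PySem.Set.ofList Bt) c3, c3)

-- ===== PORT B =====
def day_step_hybrid_alt (Bt : List (Int × Int × Int)) : (List (Int × Int × Int)) × (List (Int × Int × Int)) :=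
  let candidates :=
    [((0, 0, 1), (1, 0, 1)), ((0, 0, 1), (0, 1, 1)), ((1, 0, 1), (0, 1, 1))].foldl
      (fun c (uv : (Int × Int × Int) × (Int × Int × Int)) =>
        Bt.foldl (fun c a =>
          let la := pvCross uv.1 a
          Bt.foldl (fun c b => pvStep Bt c (pvCross la (pvCross uv.2 b))) c) c)
      []
  (PySem.Set.union (PySem.Set.ofList Bt) candidates, candidates)

-- ===== PRECONDITION & SPEC =====
def Spec_day_step_hybrid (Bt : List (Int × Int × Int)) (out : (List (Int × Int × Int)) × (List (Int × Int × Int))) : Prop := out = day_step_hybrid_alt Bt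
instance (Bt : List (Int × Int × Int)) (out : (List (Int × Int × Int)) × (List (Int × Int × Int))) : Decidable (Spec_day_step_hybrid Bt out) := by unfold Spec_day_step_hybrid; infer_instance

-- ===== CLAIM (what is proved, stated in full; the proofs are below) =====
def Claim_equal_day_step_hybrid : Prop := ∀ (Bt : List (Int × Int × Int)), Dom_day_step_hybrid Bt → Spec_day_step_hybrid Bt (day_step_hybrid Bt)

-- ===== LEMMAS AND PROOFS =====

-- generic machinery: a fold step that only appends, and is a no-op once its effect is present
theorem pv_foldl_pre {α γ : Type} (step : List γ → α → List γ)
    (h1 : ∀ c x, c <+: step c x) :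
    ∀ (L : List α) (c : List γ), c <+: L.foldl step c := by
  intro L
  induction L with
  | nil => intro c; exact List.prefix_rfl
  | cons x L ih => intro c; exact (h1 c x).trans (ih (step c x))

theorem pv_foldl_stab {α γ : Type} (step : List γ → α → List γ)
    (h1 : ∀ c x, c <+: step c x)
    (h2 : ∀ c c' x, (∀ y ∈ step c x, y ∈ c') → step c' x = c') :
    ∀ (L : List α) (c c' : List γ), (∀ y ∈ L.foldl step c, y ∈ c') → L.foldl step c' = c' := by
  intro L
  induction L with
  | nil => intro c c' h; rfl
  | cons x L ih =>
    intro c c' h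
    have hsub : ∀ y ∈ step c x, y ∈ c' := fun y hy =>
      h y ((pv_foldl_pre step h1 L (step c x)).subset hy)
    simp only [List.foldl_cons, h2 c c' x hsub]
    exact ih (step c x) c' h

theorem pv_foldl_skip {γ : Type} (step : List γ → (Int × Int × Int) → List γ)
    (h1 : ∀ c x, c <+: step c x)
    (h2 : ∀ c c' x, (∀ y ∈ step c x, y ∈ c') → step c' x = c') :
    ∀ (L : List (Int × Int × Int)) (c : List γ) (x : Int × Int × Int), step c x = c →
      (L.filter (· ≠ x)).foldl step c = L.foldl step c := by
  intro L
  induction L with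
  | nil => intro c x _; rfl
  | cons y L ih =>
    intro c x hx
    by_cases hyx : y = x
    · subst hyx
      simp only [List.filter_cons, ne_eq, not_true_eq_false, decide_false,
        Bool.false_eq_true, if_false, List.foldl_cons, hx]
      exact ih c y hx
    · simp only [List.filter_cons, ne_eq, hyx, not_false_eq_true, decide_true, if_true,
        List.foldl_cons]
      have hx' : step (step c y) x = step c y := by
        apply h2 c (step c y) x
        intro z hz
        rw [hx] at hz
        exact (h1 c y).subset hz
      exact ih (step c y) x hx'

theorem pv_foldl_add_cons :
    ∀ (L : List (Int × Int × Int)) (a : Int × Int × Int) (s : List (Int × Int × Int)),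
      L.foldl PySem.Set.add (a :: s) = a :: (L.filter (· ≠ a)).foldl PySem.Set.add s := by
  intro L
  induction L with
  | nil => intro a s; rfl
  | cons y L ih =>
    intro a s
    by_cases hya : y = a
    · subst hya
      have : PySem.Set.add (y :: s) y = y :: s := by
        simp [PySem.Set.add]
      simp only [List.foldl_cons, this, List.filter_cons, ne_eq, not_true_eq_false, decide_false,
        Bool.false_eq_true, if_false]
      exact ih y s
    · have hadd : PySem.Set.add (a :: s) y = a :: PySem.Set.add s y := by
        simp only [PySem.Set.add, PySem.Set.contains, List.contains_cons]
        have : (y == a) = false := by simp [hya]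
        simp only [PySem.Set.add, List.contains_cons, this, Bool.false_or]
        by_cases hys : s.contains y = true
        · rw [if_pos hys, if_pos hys]
        · rw [if_neg hys, if_neg hys, List.cons_append]
      simp only [List.foldl_cons, hadd, List.filter_cons, ne_eq, hya, not_false_eq_true,
        decide_true, if_true]
      exact ih a (PySem.Set.add s y)

theorem pv_ofList_cons (x : Int × Int × Int) (L : List (Int × Int × Int)) :
    PySem.Set.ofList (x :: L) = x :: PySem.Set.ofList (L.filter (· ≠ x)) := by
  calc PySem.Set.ofList (x :: L) = L.foldl PySem.Set.add [x] := by
        simp [PySem.Set.ofList_eq_foldl, PySem.Set.add]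
    _ = x :: (L.filter (· ≠ x)).foldl PySem.Set.add [] := pv_foldl_add_cons L x []
    _ = x :: PySem.Set.ofList (L.filter (· ≠ x)) := by rw [PySem.Set.ofList_eq_foldl]

theorem pv_foldl_ofList {γ : Type} (step : List γ → (Int × Int × Int) → List γ)
    (h1 : ∀ c x, c <+: step c x)
    (h2 : ∀ c c' x, (∀ y ∈ step c x, y ∈ c') → step c' x = c')
    (L : List (Int × Int × Int)) (c : List γ) :
    (PySem.Set.ofList L).foldl step c = L.foldl step c := by
  match L with
  | [] => rfl
  | x :: L' =>
    rw [pv_ofList_cons, List.foldl_cons, List.foldl_cons,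
      pv_foldl_ofList step h1 h2 (L'.filter (· ≠ x)) (step c x)]
    apply pv_foldl_skip step h1 h2
    exact h2 c (step c x) x (fun y hy => hy)
termination_by L.length
decreasing_by
  simp only [List.length_cons]
  exact Nat.lt_succ_of_le (List.length_filter_le _ _)

-- the shared body satisfies both hypotheses
theorem pvStep_pre (Bt c : List (Int × Int × Int)) (P : Int × Int × Int) : c <+: pvStep Bt c P := by
  unfold pvStep
  split
  · exact List.prefix_rfl
  · split
    · exact List.prefix_rfl
    · simp only [PySem.Set.add]
      split
      · exact List.prefix_rfl
      · exact List.prefix_append _ _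

theorem pvStep_stab (Bt c c' : List (Int × Int × Int)) (P : Int × Int × Int)
    (h : ∀ y ∈ pvStep Bt c P, y ∈ c') : pvStep Bt c' P = c' := by
  unfold pvStep at h ⊢
  by_cases h0 : P = (0, 0, 0)
  · rw [if_pos h0]
  · rw [if_neg h0] at h ⊢
    by_cases hR : pvCanon P.1 P.2.1 P.2.2 ∈ pvREDS ∨ pvCanon P.1 P.2.1 P.2.2 ∈ Bt
    · rw [if_pos hR]
    · rw [if_neg hR] at h ⊢
      have hQ : pvCanon P.1 P.2.1 P.2.2 ∈ c' := by
        apply h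
        simp only [PySem.Set.add]
        split
        · rename_i hc
          exact List.contains_iff_mem.mp hc
        · exact List.mem_append_right _ (List.mem_singleton.mpr rfl)
      have hc' : PySem.Set.contains c' (pvCanon P.1 P.2.1 P.2.2) = true := by
        simp [PySem.Set.contains, hQ]
      simp only [PySem.Set.add]
      rw [if_pos hc']

-- one pencil pairing: B's direct point-pair double loop equals A's double loop over
-- the deduplicated line tables
theorem pv_pencil_eq (Bt : List (Int × Int × Int)) (u v : Int × Int × Int)
    (c : List (Int × Int × Int)) :
    Bt.foldl (fun c a =>
      Bt.foldl (fun c b => pvStep Bt c (pvCross (pvCross u a) (pvCross v b))) c) c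
    = pvAddInter Bt c (PySem.Set.ofList (Bt.map (fun b => pvCross u b)))
        (PySem.Set.ofList (Bt.map (fun b => pvCross v b))) := by
  have h1i : ∀ (la : Int × Int × Int) (c : List (Int × Int × Int)) (lb : Int × Int × Int),
      c <+: pvStep Bt c (pvCross la lb) := fun la c lb => pvStep_pre Bt c _
  have h2i : ∀ (la : Int × Int × Int) (c c' : List (Int × Int × Int)) (lb : Int × Int × Int),
      (∀ y ∈ pvStep Bt c (pvCross la lb), y ∈ c') → pvStep Bt c' (pvCross la lb) = c' :=
    fun la c c' lb h => pvStep_stab Bt c c' _ h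
  -- inner loops: traverse points b ↦ traverse deduplicated lines lb
  have hinner : ∀ (la : Int × Int × Int) (c : List (Int × Int × Int)),
      Bt.foldl (fun c b => pvStep Bt c (pvCross la (pvCross v b))) c
      = (PySem.Set.ofList (Bt.map (fun b => pvCross v b))).foldl
          (fun c lb => pvStep Bt c (pvCross la lb)) c := by
    intro la c
    rw [pv_foldl_ofList (fun c lb => pvStep Bt c (pvCross la lb)) (h1i la) (h2i la), List.foldl_map]
  -- outer loop, with the whole inner fold as the step
  have hF1 : ∀ (c : List (Int × Int × Int)) (la : Int × Int × Int),
      c <+: (PySem.Set.ofList (Bt.map (fun b => pvCross v b))).foldl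
          (fun c lb => pvStep Bt c (pvCross la lb)) c :=
    fun c la => pv_foldl_pre _ (h1i la) _ c
  have hF2 : ∀ (c c' : List (Int × Int × Int)) (la : Int × Int × Int),
      (∀ y ∈ (PySem.Set.ofList (Bt.map (fun b => pvCross v b))).foldl
          (fun c lb => pvStep Bt c (pvCross la lb)) c, y ∈ c') →
      (PySem.Set.ofList (Bt.map (fun b => pvCross v b))).foldl
          (fun c lb => pvStep Bt c (pvCross la lb)) c' = c' :=
    fun c c' la h => pv_foldl_stab _ (h1i la) (h2i la) _ c c' h
  calc Bt.foldl (fun c a =>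
        Bt.foldl (fun c b => pvStep Bt c (pvCross (pvCross u a) (pvCross v b))) c) c
      = Bt.foldl (fun c a =>
          (PySem.Set.ofList (Bt.map (fun b => pvCross v b))).foldl
            (fun c lb => pvStep Bt c (pvCross (pvCross u a) lb)) c) c := by
        apply List.foldl_ext
        intro c' a _
        exact hinner (pvCross u a) c'
    _ = (Bt.map (fun b => pvCross u b)).foldl (fun c la =>
          (PySem.Set.ofList (Bt.map (fun b => pvCross v b))).foldl
            (fun c lb => pvStep Bt c (pvCross la lb)) c) c := by
        rw [List.foldl_map]
    _ = pvAddInter Bt c (PySem.Set.ofList (Bt.map (fun b => pvCross u b)))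
          (PySem.Set.ofList (Bt.map (fun b => pvCross v b))) := by
        rw [pvAddInter, pv_foldl_ofList _ hF1 hF2]

-- ===== VERDICT (by name: the statement is the Claim_ definition above) =====
theorem day_step_hybrid_spec : Claim_equal_day_step_hybrid := by
  intro Bt _
  unfold Spec_day_step_hybrid day_step_hybrid day_step_hybrid_alt
  simp only [List.foldl_cons, List.foldl_nil]
  rw [pv_pencil_eq, pv_pencil_eq, pv_pencil_eq]
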